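-- pv_equiv track=rewrite | github.com/MohamedAlkurdi/ml_catalogue_backend | bayes_classifier/utils/datalab.py | equivalent_target_values
-- ===== SOURCE A (Python) =====
-- def equivalent_target_values(feature_values, feature_column, target_column):
--     classes_dict = {}
--     for j in range(len(feature_values)):
--         classes_dict[feature_values[j]] = []
--     for i in range(len(feature_column)):
--         classes_dict[feature_column[i]].append(target_column[i])
--     for c in classes_dict:
--         classes_dict[c] = {x:classes_dict[c].count(x) for x in classes_dict[c]}
--     return classes_dict
-- ===== SOURCE B (Python) =====
-- def equivalent_target_values(feature_values, feature_column, target_column):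
--     classes_dict = {v: {} for v in feature_values}
--     for f, t in zip(feature_column, target_column):
--         inner = classes_dict[f]
--         inner[t] = inner.get(t, 0) + 1
--     return classes_dict
-- ===== Notes on version B (the rewrite author's own statement) =====
-- stated objective: faster
-- what changed: B counts directly in one pass over zip(feature_column, target_column), incrementing nested dict counters, instead of A's three passes that build per-class lists and then call list.count for every element (quadratic per class).
import Mathlib
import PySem

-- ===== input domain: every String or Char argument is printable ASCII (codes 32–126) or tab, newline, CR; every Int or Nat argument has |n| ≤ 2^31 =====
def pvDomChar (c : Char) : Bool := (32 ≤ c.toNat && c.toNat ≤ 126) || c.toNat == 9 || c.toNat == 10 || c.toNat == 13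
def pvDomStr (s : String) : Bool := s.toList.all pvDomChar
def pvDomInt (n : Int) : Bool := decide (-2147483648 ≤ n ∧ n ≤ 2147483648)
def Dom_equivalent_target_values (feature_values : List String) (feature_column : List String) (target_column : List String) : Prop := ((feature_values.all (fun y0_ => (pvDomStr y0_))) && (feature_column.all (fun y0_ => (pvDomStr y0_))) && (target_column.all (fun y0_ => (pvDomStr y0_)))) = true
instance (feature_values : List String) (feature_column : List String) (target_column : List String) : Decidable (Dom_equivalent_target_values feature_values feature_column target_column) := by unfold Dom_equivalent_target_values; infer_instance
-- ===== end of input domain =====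

-- B replaces A's three passes (list-building then per-element list.count) by one counting pass
-- over zip(feature_column, target_column) into nested dict counters (objective: faster).

-- ===== PORT A =====
-- Python's third loop replaces each value of the insertion-ordered dict in place while
-- iterating its keys, which is exactly a map over its items; the returned dict of dicts is
-- rendered as its items list (inner dicts likewise), per the type convention.
def equivalent_target_values (feature_values : List String) (feature_column : List String) (target_column : List String) : List (String × List (String × Int)) :=
  let d0 : PySem.Dict String (List String) :=
    (PySem.List.pyRange 0 (PySem.List.len feature_values)).foldl
      (fun d j => d.insert (PySem.List.pyGetD feature_values j "") []) PySem.Dict.empty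
  let d1 :=
    (PySem.List.pyRange 0 (PySem.List.len feature_column)).foldl
      (fun d i => d.modify (PySem.List.pyGetD feature_column i "") []
        (fun lst => lst ++ [PySem.List.pyGetD target_column i ""])) d0
  d1.items.map (fun p =>
    (p.1, (p.2.foldl (fun acc x => acc.insert x ((p.2.count x : Int))) PySem.Dict.empty).items))

-- ===== PORT B =====
-- classes_dict[f] raises KeyError for f ∉ feature_values; that input is outside Pre_ below,
-- so the total `modify` (which would create the key) is only relied on where Python returns.
def equivalent_target_values_alt (feature_values : List String) (feature_column : List String) (target_column : List String) : List (String × List (String × Int)) :=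
  let d0 : PySem.Dict String (PySem.Dict String Int) :=
    feature_values.foldl (fun d v => d.insert v PySem.Dict.empty) PySem.Dict.empty
  let d1 :=
    (feature_column.zip target_column).foldl
      (fun d p => d.modify p.1 PySem.Dict.empty
        (fun inner => inner.insert p.2 (inner.getD p.2 0 + 1))) d0
  d1.items.map (fun p => (p.1, p.2.items))

-- ===== PRECONDITION & SPEC =====
-- Pre_ excludes exactly the inputs where Python A raises: a KeyError when some entry of
-- feature_column never occurs in feature_values, and an IndexError when target_column is
-- shorter than feature_column.
def Pre_equivalent_target_values (feature_values : List String) (feature_column : List String) (target_column : List String) : Prop :=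
  (∀ f ∈ feature_column, f ∈ feature_values) ∧ feature_column.length ≤ target_column.length
instance (feature_values : List String) (feature_column : List String) (target_column : List String) : Decidable (Pre_equivalent_target_values feature_values feature_column target_column) := by unfold Pre_equivalent_target_values; infer_instance

def pvWitness_equivalent_target_values : List String × List String × List String :=
  (["a", "b"], ["a", "a", "b"], ["x", "y", "x"])

def Spec_equivalent_target_values (feature_values : List String) (feature_column : List String) (target_column : List String) (out : List (String × List (String × Int))) : Prop := out = equivalent_target_values_alt feature_values feature_column target_column
instance (feature_values : List String) (feature_column : List String) (target_column : List String) (out : List (String × List (String × Int))) : Decidable (Spec_equivalent_target_values feature_values feature_column target_column out) := by unfold Spec_equivalent_target_values; infer_instance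

-- ===== CLAIM (what is proved, stated in full; the proofs are below) =====
def Claim_equal_equivalent_target_values : Prop := ∀ (feature_values : List String) (feature_column : List String) (target_column : List String), Dom_equivalent_target_values feature_values feature_column target_column → Pre_equivalent_target_values feature_values feature_column target_column → Spec_equivalent_target_values feature_values feature_column target_column (equivalent_target_values feature_values feature_column target_column)

-- ===== LEMMAS AND PROOFS =====

/-- A fold inserting a value that depends only on the key: lookup afterwards. -/
theorem getD_foldl_insert_fun {κ ν : Type} [BEq κ] [LawfulBEq κ] [DecidableEq κ]
    (g : κ → ν) (dflt : ν) :
    ∀ (l : List κ) (d : PySem.Dict κ ν) (k : κ),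
      (l.foldl (fun acc x => acc.insert x (g x)) d).getD k dflt =
        if k ∈ l then g k else d.getD k dflt := by
  intro l
  induction l with
  | nil => intro d k; simp
  | cons x t ih =>
    intro d k
    simp only [List.foldl_cons, ih, PySem.Dict.getD_insert, List.mem_cons]
    by_cases hkt : k ∈ t <;> by_cases hkx : k = x <;> simp [hkt, hkx]

/-- Lookup after a fold of `modify p.1 d0 (step · p.2)` over key-value pairs:
    the per-key stream folded onto the previous value. -/
theorem getD_foldl_modify_apply {κ ν β : Type} [BEq κ] [LawfulBEq κ] [DecidableEq κ]
    (step : ν → β → ν) (d0 : ν) :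
    ∀ (l : List (κ × β)) (d : PySem.Dict κ ν) (c : κ),
      (l.foldl (fun d p => d.modify p.1 d0 (fun v => step v p.2)) d).getD c d0 =
        ((l.filter (fun p => p.1 == c)).map (·.2)).foldl step (d.getD c d0) := by
  intro l
  induction l with
  | nil => intro d c; simp
  | cons p t ih =>
    intro d c
    simp only [List.foldl_cons, ih, List.filter_cons]
    by_cases hc : p.1 = c
    · simp [hc]
    · have : (p.1 == c) = false := by simp [hc]
      simp [this, PySem.Dict.getD_modify, Ne.symm hc]

/-- The dict comprehension `{x: lst.count(x) for x in lst}` has the same items as `Counter(lst)`. -/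
theorem comprehension_count_eq_counter_items (lst : List String) :
    (lst.foldl (fun acc x => acc.insert x ((lst.count x : Int))) PySem.Dict.empty).items =
      (PySem.Dict.counter lst).items := by
  have hnd : (lst.foldl (fun acc x => acc.insert x ((lst.count x : Int))) PySem.Dict.empty).keys.Nodup := by
    exact PySem.Dict.nodup_keys_foldl_insert lst _ _ (by simp)
  rw [PySem.Dict.items_counter, PySem.Dict.items_eq_map_keys _ hnd (0 : Int)]
  have hk : (lst.foldl (fun acc x => acc.insert x ((lst.count x : Int))) PySem.Dict.empty).keys =
      PySem.Set.ofList lst := by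
    rw [PySem.Dict.keys_foldl_insert, PySem.Dict.keys_empty, PySem.Set.ofList_eq_foldl]
    rfl
  rw [hk]
  apply List.map_congr_left
  intro k hkmem
  have : k ∈ lst := (PySem.Set.mem_ofList lst k).mp hkmem
  rw [getD_foldl_insert_fun]
  simp [this]

/-- A's index loop over `range(len(feature_column))` is the fold over `zip fc tc`. -/
theorem loopA_eq_zip (fc tc : List String) (d : PySem.Dict String (List String))
    (h : fc.length ≤ tc.length) :
    (PySem.List.pyRange 0 (PySem.List.len fc)).foldl
      (fun d i => d.modify (PySem.List.pyGetD fc i "") []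
        (fun lst => lst ++ [PySem.List.pyGetD tc i ""])) d =
    (fc.zip tc).foldl (fun d p => d.modify p.1 [] (fun lst => lst ++ [p.2])) d := by
  have hlen : (fc.zip tc).length = fc.length := by
    simp [List.length_zip]; omega
  have hcongr : ∀ (acc : PySem.Dict String (List String)), ∀ i ∈ PySem.List.pyRange 0 (PySem.List.len fc),
      acc.modify (PySem.List.pyGetD fc i "") [] (fun lst => lst ++ [PySem.List.pyGetD tc i ""]) =
      (fun d p => PySem.Dict.modify d p.1 [] (fun lst => lst ++ [p.2])) acc
        (PySem.List.pyGetD (fc.zip tc) i ("", "")) := by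
    intro acc i hi
    have hb := (PySem.List.mem_pyRange_one).mp hi
    have h0 : (0:Int) ≤ i := hb.1
    have h1 : i < (fc.length : Int) := by simpa [PySem.List.len] using hb.2
    have h2 : i < (tc.length : Int) := lt_of_lt_of_le h1 (by exact_mod_cast h)
    have hz : i < ((fc.zip tc).length : Int) := by rw [hlen]; exact h1
    rw [PySem.List.pyGetD_eq_getElem fc "" h0 h1, PySem.List.pyGetD_eq_getElem tc "" h0 h2,
        PySem.List.pyGetD_eq_getElem (fc.zip tc) ("", "") h0 hz]
    simp [List.getElem_zip]
  rw [PySem.List.foldl_congr_mem _ _ _ _ hcongr]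
  have hlen' : PySem.List.len fc = PySem.List.len (fc.zip tc) := by
    simp [PySem.List.len, hlen]
  rw [hlen', PySem.List.foldl_pyRange_pyGetD (fc.zip tc) ("", "")
        (fun d p => PySem.Dict.modify d p.1 [] (fun lst => lst ++ [p.2])) d (le_refl 0)]
  simp

/-- A's init loop over `range(len(feature_values))` is the fold over feature_values. -/
theorem initA_eq_fold (fv : List String) :
    (PySem.List.pyRange 0 (PySem.List.len fv)).foldl
      (fun d j => d.insert (PySem.List.pyGetD fv j "") ([] : List String)) PySem.Dict.empty =
    fv.foldl (fun d v => d.insert v ([] : List String)) PySem.Dict.empty := by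
  rw [PySem.List.foldl_pyRange_pyGetD fv ""
        (fun d v => PySem.Dict.insert d v ([] : List String)) PySem.Dict.empty (le_refl 0)]
  simp

theorem main_equiv (fv fc tc : List String)
    (h : (∀ f ∈ fc, f ∈ fv) ∧ fc.length ≤ tc.length) :
    equivalent_target_values fv fc tc = equivalent_target_values_alt fv fc tc := by
  obtain ⟨-, hlen⟩ := h
  unfold equivalent_target_values equivalent_target_values_alt
  dsimp only
  rw [initA_eq_fold, loopA_eq_zip fc tc _ hlen]
  set L := fc.zip tc with hL
  set d0A := fv.foldl (fun d v => d.insert v ([] : List String)) PySem.Dict.empty with hd0A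
  set d0B := fv.foldl (fun d v => d.insert v (PySem.Dict.empty : PySem.Dict String Int)) PySem.Dict.empty with hd0B
  set d1A := L.foldl (fun d p => d.modify p.1 [] (fun lst => lst ++ [p.2])) d0A with hd1A
  set d1B := L.foldl (fun d p => d.modify p.1 PySem.Dict.empty
      (fun inner => inner.insert p.2 (inner.getD p.2 0 + 1))) d0B with hd1B
  have hndA : d1A.keys.Nodup := by
    rw [hd1A]
    exact PySem.Dict.nodup_keys_foldl_modify_key L Prod.fst []
      (fun _ p => fun lst => lst ++ [p.2]) d0A
      (PySem.Dict.nodup_keys_foldl_insert fv (fun _ _ => []) _ (by simp))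
  have hndB : d1B.keys.Nodup := by
    rw [hd1B]
    exact PySem.Dict.nodup_keys_foldl_modify_key L Prod.fst PySem.Dict.empty
      (fun _ p => fun inner => inner.insert p.2 (inner.getD p.2 0 + 1)) d0B
      (PySem.Dict.nodup_keys_foldl_insert fv (fun _ _ => PySem.Dict.empty) _ (by simp))
  have hkA : d1A.keys = PySem.Set.update (PySem.Set.update [] fv) (L.map Prod.fst) := by
    rw [hd1A,
        PySem.Dict.keys_foldl_modify_key L Prod.fst [] (fun _ p => fun lst => lst ++ [p.2]) d0A,
        hd0A, PySem.Dict.keys_foldl_insert fv (fun _ _ => []) _, PySem.Dict.keys_empty]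
  have hkB : d1B.keys = PySem.Set.update (PySem.Set.update [] fv) (L.map Prod.fst) := by
    rw [hd1B,
        PySem.Dict.keys_foldl_modify_key L Prod.fst PySem.Dict.empty
          (fun _ p => fun inner => inner.insert p.2 (inner.getD p.2 0 + 1)) d0B,
        hd0B, PySem.Dict.keys_foldl_insert fv (fun _ _ => PySem.Dict.empty) _, PySem.Dict.keys_empty]
  rw [PySem.Dict.items_eq_map_keys d1A hndA ([] : List String),
      PySem.Dict.items_eq_map_keys d1B hndB (PySem.Dict.empty : PySem.Dict String Int),
      hkA, hkB, List.map_map, List.map_map]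
  apply List.map_congr_left
  intro k _
  simp only [Function.comp_apply]
  have hvA : d1A.getD k [] = (L.filter (fun p => p.1 == k)).map (·.2) := by
    rw [hd1A, PySem.Dict.getD_foldl_modify_append L d0A k, hd0A,
        getD_foldl_insert_fun (fun _ => ([] : List String)) [] fv PySem.Dict.empty k]
    simp
  have hvB : d1B.getD k PySem.Dict.empty =
      PySem.Dict.counter ((L.filter (fun p => p.1 == k)).map (·.2)) := by
    rw [hd1B, getD_foldl_modify_apply (fun inner x => inner.insert x (inner.getD x 0 + 1))
          PySem.Dict.empty L d0B k, hd0B,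
        getD_foldl_insert_fun (fun _ => (PySem.Dict.empty : PySem.Dict String Int))
          PySem.Dict.empty fv PySem.Dict.empty k]
    have hbase : (if k ∈ fv then (PySem.Dict.empty : PySem.Dict String Int)
        else PySem.Dict.empty.getD k PySem.Dict.empty) = PySem.Dict.empty := by
      split <;> simp
    rw [hbase, PySem.Dict.foldl_insert_getD_add_one_eq_counter]
  rw [hvA, hvB, comprehension_count_eq_counter_items]

-- ===== VERDICT (by name: the statement is the Claim_ definition above) =====
theorem equivalent_target_values_spec : Claim_equal_equivalent_target_values := by
  intro fv fc tc _ hpre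
  unfold Spec_equivalent_target_values
  exact main_equiv fv fc tc hpre
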